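/- GENERATED by mk_final_copies.py from the proof of the farm's unit `lookup1_values` (farm:lookup1_values.1: Proof.lean) as the
   re-elaboration sweep compiled it — do not edit. -/
import Vorbis.Spec.Units.lookup1_values

open X86 X86.User Asan Vorbis

set_option maxRecDepth 4000
set_option maxHeartbeats 16000000

namespace Vorbis.Spec.lookup1_values

/-- What the entry state `u` gives to every segment of the walk: the layout, the room on the stack, the shadow clause. -/
structure EntryFacts (Lay : Layout) (others : List Obj) (frames : List (Nat × FrameLayout)) (u : State) (ret : Word) : Prop where
  /-- the user region ends at 1000000H -/
  lay : Lay.hi = 0x1000000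
  /-- the return address is a user address -/
  ret_lt : ret < 1073741824
  /-- the stack pointer at the entry is 8-aligned -/
  align : (u.reg .rsp).toNat % 8 = 0
  /-- 104 bytes of stack below the return address -/
  room : 7340032 + 104 ≤ (u.reg .rsp).toNat
  /-- the return address slot is inside the stack -/
  top : (u.reg .rsp).toNat + 8 ≤ 8388608
  /-- the whole frame (and the return address) is mapped -/
  stack : Lay.Has (u.reg .rsp - 104) 112
  /-- the shadow clause of the precondition -/
  sh : ShadowPre others frames u

/-- What holds at every cut point (the instruction after each of the eight calls) of `lookup1_values`, about the state `s`
there, in terms of the entry state `u`: the frame is 40 bytes deep, the three slots the epilogue reads (return address, saved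
rbp, saved rbx) are what they were, only the frame was written, the shadow was not, the code is intact, DF and MXCSR are the ABI's.
Nothing is said of rbx / rbp / the spilled floats: they are opaque to the proof. -/
structure AtCut (u₀ u : State) (ret : Word) (s : State) : Prop where
  /-- the stack pointer: two pushes and `sub rsp, 18H` -/
  rsp : s.reg .rsp = u.reg .rsp - 40
  /-- the registers outside this list are the entry's -/
  kept : RegsKept [Reg.rbp, Reg.rbx, Reg.rsp, Reg.rax, Reg.rcx, Reg.rdx, Reg.rsi, Reg.rdi, Reg.r8, Reg.r9, Reg.r10,
    Reg.r11, Reg.r16, Reg.r17, Reg.r18, Reg.r19, Reg.r20, Reg.r21, Reg.r22, Reg.r23, Reg.r24, Reg.r25, Reg.r26, Reg.r27,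
    Reg.r28, Reg.r29, Reg.r30, Reg.r31] u s
  /-- the text is the reference state's -/
  eq : Mem.EqOn Vorbis.L.textLo Vorbis.L.textHi u₀.mem s.mem
  /-- the direction flag -/
  df : s.flags.get Flag.df = false
  /-- the MXCSR masks -/
  mx : s.mxcsr &&& 8064 = 8064
  /-- the SSE state -/
  sse : SseOK s
  /-- only the 104 bytes of stack were written -/
  same : Mem.SameExcept [⟨(u.reg .rsp).toNat - 104, (u.reg .rsp).toNat⟩] u.mem s.mem
  /-- no store went to the shadow -/
  un : ShadowUntouched u.mem s.mem
  /-- the return address slot -/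
  s0 : UInt64.ofNat (s.mem.readLE (u.reg .rsp) 8) = ret
  /-- the saved rbp -/
  s1 : UInt64.ofNat (s.mem.readLE (u.reg .rsp - 8) 8) = u.reg .rbp
  /-- the saved rbx -/
  s2 : UInt64.ofNat (s.mem.readLE (u.reg .rsp - 16) 8) = u.reg .rbx


/-- From 0x10bb4a (cut8, after the last `floor`; C line 1275 `if (floor(pow((float) r, dim)) > entries)`): `comisd`, `ja` to the
`return -1` stub 0x10bb6f or straight on, then the epilogue 0x10bb51 `mov eax, ebx ; add rsp, 18H ; pop rbx ; pop rbp ; ret`. -/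
theorem from_cut8 {Lay : Layout} {μ : Microarch} (hμ : UserX.MicroOK μ) {u₀ : State}
    (hcode : HasCodeNat Lay u₀ Vorbis.L.lookup1_values.entry Vorbis.Code.code_lookup1_values.nat
      Vorbis.L.lookup1_values.size)
    {others : List Obj} {frames : List (Nat × FrameLayout)}
    {u : State} {ret : Word} (henv : EntryFacts Lay others frames u ret)
    {s : State} (hc : AtCut u₀ u ret s) (w_rip : s.rip = Vorbis.L.lookup1_values.cut8) :
    ReachVia Lay μ WayInv s (Returned (conv u₀) (Vorbis.Spec.lookup1_values.spec others frames) u ret) := by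
  have henv' := henv
  obtain ⟨hLay, he_ret_lt, he_align, he_room, he_top, he_stack, hsh⟩ := henv'
  obtain ⟨w_rsp, w_kept, w_eq, w_df, w_mx, w_sse, hsame, hun, hs0, hs1, hs2⟩ := hc
  u_walk hcode [hμ.vendor] span [Vorbis.L.textLo, Vorbis.L.textHi] side (v_side)
  · -- 0x10bb6f: `return -1` (line 1276), the epilogue
    refine ReachVia.done ?_
    v_returned
    show ShadowUntouched u.mem s_10bb59.mem
    v_untouched
  · -- 0x10bb51: `return r` (line 1278), the epilogue
    refine ReachVia.done ?_
    v_returned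
    show ShadowUntouched u.mem s_10bb59.mem
    v_untouched

/-- From 0x10bb45 (cut7, after the third `pow`; C line 1275): `call floor`, then cut8. -/
theorem from_cut7 {Lay : Layout} {μ : Microarch} (hμ : UserX.MicroOK μ) {u₀ : State}
    (hcode : HasCodeNat Lay u₀ Vorbis.L.lookup1_values.entry Vorbis.Code.code_lookup1_values.nat
      Vorbis.L.lookup1_values.size)
    {others : List Obj} {frames : List (Nat × FrameLayout)}
    (hfloor : Calls Lay μ Vorbis.WayInv (Vorbis.conv u₀) Vorbis.L.floor.entry (Vorbis.Spec.floor.spec others frames))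
    {u : State} {ret : Word} (henv : EntryFacts Lay others frames u ret)
    {s : State} (hc : AtCut u₀ u ret s) (w_rip : s.rip = Vorbis.L.lookup1_values.cut7) :
    ReachVia Lay μ WayInv s (Returned (conv u₀) (Vorbis.Spec.lookup1_values.spec others frames) u ret) := by
  have henv' := henv
  obtain ⟨hLay, he_ret_lt, he_align, he_room, he_top, he_stack, hsh⟩ := henv'
  obtain ⟨w_rsp, w_kept, w_eq, w_df, w_mx, w_sse, hsame, hun, hs0, hs1, hs2⟩ := hc
  u_walk hcode [hμ.vendor] span [Vorbis.L.textLo, Vorbis.L.textHi] side (v_side)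
  case call_inv => v_inv
  case pre_10bb45 =>
    -- the callee's shadow clause: the stores so far went to our frame, its frame is below ours
    show ShadowPre others frames s_10bb45
    refine hsh.callee ?_ ?_ ?_ ?_
    · v_untouched
    · rw [w_rsp]
      u_omega
    · rw [w_rsp]
      u_omega
    · rw [w_rsp]
      u_omega
  · -- 0x10bb4a (cut8): after `floor`
    v_after_call w_rsp_10bb45 w_mem_10bb45
    refine from_cut8 hμ hcode henv ⟨w_rsp, w_kept, w_eq, w_df, w_mx, w_sse, ?_, ?_, ?_, ?_, ?_⟩ w_rip
    · -- only the frame was written: our stores, and the callee's frame below ours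
      u_same
    · v_untouched
    · u_frame hs0
    · u_frame hs1
    · u_frame hs2

/-- From 0x10bb26 (cut6, after the second `pow`; C line 1273 `if (pow((float) r+1, dim) <= entries)`): `comisd`, `jae` to the
`return -1` stub 0x10bb68, or the third `pow((float) r, dim)` (0x10bb40; its argument is read back from [rsp+0CH]), then cut7. -/
theorem from_cut6 {Lay : Layout} {μ : Microarch} (hμ : UserX.MicroOK μ) {u₀ : State}
    (hcode : HasCodeNat Lay u₀ Vorbis.L.lookup1_values.entry Vorbis.Code.code_lookup1_values.nat
      Vorbis.L.lookup1_values.size)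
    {others : List Obj} {frames : List (Nat × FrameLayout)}
    (hfloor : Calls Lay μ Vorbis.WayInv (Vorbis.conv u₀) Vorbis.L.floor.entry (Vorbis.Spec.floor.spec others frames))
    (hpow : Calls Lay μ Vorbis.WayInv (Vorbis.conv u₀) Vorbis.L.pow.entry (Vorbis.Spec.pow.spec others frames))
    {u : State} {ret : Word} (henv : EntryFacts Lay others frames u ret)
    {s : State} (hc : AtCut u₀ u ret s) (w_rip : s.rip = Vorbis.L.lookup1_values.cut6) :
    ReachVia Lay μ WayInv s (Returned (conv u₀) (Vorbis.Spec.lookup1_values.spec others frames) u ret) := by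
  have henv' := henv
  obtain ⟨hLay, he_ret_lt, he_align, he_room, he_top, he_stack, hsh⟩ := henv'
  obtain ⟨w_rsp, w_kept, w_eq, w_df, w_mx, w_sse, hsame, hun, hs0, hs1, hs2⟩ := hc
  u_walk hcode [hμ.vendor] span [Vorbis.L.textLo, Vorbis.L.textHi] side (v_side)
  case call_inv => v_inv
  case pre_10bb40 =>
    -- the callee's shadow clause: the stores so far went to our frame, its frame is below ours
    show ShadowPre others frames s_10bb40
    refine hsh.callee ?_ ?_ ?_ ?_
    · v_untouched
    · rw [w_rsp]
      u_omega
    · rw [w_rsp]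
      u_omega
    · rw [w_rsp]
      u_omega
  · -- 0x10bb68: `return -1` (line 1274), the epilogue
    refine ReachVia.done ?_
    v_returned
    show ShadowUntouched u.mem s_10bb59.mem
    v_untouched
  · -- 0x10bb45 (cut7): after `pow`
    v_after_call w_rsp_10bb40 w_mem_10bb40
    refine from_cut7 hμ hcode hfloor henv ⟨w_rsp, w_kept, w_eq, w_df, w_mx, w_sse, ?_, ?_, ?_, ?_, ?_⟩ w_rip
    · -- only the frame was written: our stores, and the callee's frame below ours
      u_same
    · v_untouched
    · u_frame hs0
    · u_frame hs1
    · u_frame hs2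

/-- From 0x10baf1 (cut5, after the second `floor`; C line 1271 `if (floor(pow((float) r+1, dim)) <= entries) ++r`): `comisd`,
`jb` over the `add ebx, 1` or not (two paths, the same but for ebx), `(float) r` spilled to [rsp+0CH], the second `pow`
(0x10bb21), then cut6. -/
theorem from_cut5 {Lay : Layout} {μ : Microarch} (hμ : UserX.MicroOK μ) {u₀ : State}
    (hcode : HasCodeNat Lay u₀ Vorbis.L.lookup1_values.entry Vorbis.Code.code_lookup1_values.nat
      Vorbis.L.lookup1_values.size)
    {others : List Obj} {frames : List (Nat × FrameLayout)}
    (hfloor : Calls Lay μ Vorbis.WayInv (Vorbis.conv u₀) Vorbis.L.floor.entry (Vorbis.Spec.floor.spec others frames))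
    (hpow : Calls Lay μ Vorbis.WayInv (Vorbis.conv u₀) Vorbis.L.pow.entry (Vorbis.Spec.pow.spec others frames))
    {u : State} {ret : Word} (henv : EntryFacts Lay others frames u ret)
    {s : State} (hc : AtCut u₀ u ret s) (w_rip : s.rip = Vorbis.L.lookup1_values.cut5) :
    ReachVia Lay μ WayInv s (Returned (conv u₀) (Vorbis.Spec.lookup1_values.spec others frames) u ret) := by
  have henv' := henv
  obtain ⟨hLay, he_ret_lt, he_align, he_room, he_top, he_stack, hsh⟩ := henv'
  obtain ⟨w_rsp, w_kept, w_eq, w_df, w_mx, w_sse, hsame, hun, hs0, hs1, hs2⟩ := hc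
  u_walk hcode [hμ.vendor] span [Vorbis.L.textLo, Vorbis.L.textHi] side (v_side)
  case call_inv => v_inv
  case pre_10bb21 =>
    -- the callee's shadow clause: the stores so far went to our frame, its frame is below ours
    show ShadowPre others frames s_10bb21
    refine hsh.callee ?_ ?_ ?_ ?_
    · v_untouched
    · rw [w_rsp]
      u_omega
    · rw [w_rsp]
      u_omega
    · rw [w_rsp]
      u_omega
  case call_inv => v_inv
  case pre_10bb21 =>
    -- the callee's shadow clause: the stores so far went to our frame, its frame is below ours
    show ShadowPre others frames s_10bb21
    refine hsh.callee ?_ ?_ ?_ ?_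
    · v_untouched
    · rw [w_rsp]
      u_omega
    · rw [w_rsp]
      u_omega
    · rw [w_rsp]
      u_omega
  · -- 0x10bb26 (cut6): after `pow`, `r` not incremented
    v_after_call w_rsp_10bb21 w_mem_10bb21
    refine from_cut6 hμ hcode hfloor hpow henv ⟨w_rsp, w_kept, w_eq, w_df, w_mx, w_sse, ?_, ?_, ?_, ?_, ?_⟩ w_rip
    · -- only the frame was written: our stores, and the callee's frame below ours
      u_same
    · v_untouched
    · u_frame hs0
    · u_frame hs1
    · u_frame hs2
  · -- 0x10bb26 (cut6): after `pow`, `++r` (line 1272)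
    v_after_call w_rsp_10bb21 w_mem_10bb21
    refine from_cut6 hμ hcode hfloor hpow henv ⟨w_rsp, w_kept, w_eq, w_df, w_mx, w_sse, ?_, ?_, ?_, ?_, ?_⟩ w_rip
    · -- only the frame was written: our stores, and the callee's frame below ours
      u_same
    · v_untouched
    · u_frame hs0
    · u_frame hs1
    · u_frame hs2

/-- From 0x10baec (cut4, after the first `pow`; C line 1271): `call floor`, then cut5. -/
theorem from_cut4 {Lay : Layout} {μ : Microarch} (hμ : UserX.MicroOK μ) {u₀ : State}
    (hcode : HasCodeNat Lay u₀ Vorbis.L.lookup1_values.entry Vorbis.Code.code_lookup1_values.nat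
      Vorbis.L.lookup1_values.size)
    {others : List Obj} {frames : List (Nat × FrameLayout)}
    (hfloor : Calls Lay μ Vorbis.WayInv (Vorbis.conv u₀) Vorbis.L.floor.entry (Vorbis.Spec.floor.spec others frames))
    (hpow : Calls Lay μ Vorbis.WayInv (Vorbis.conv u₀) Vorbis.L.pow.entry (Vorbis.Spec.pow.spec others frames))
    {u : State} {ret : Word} (henv : EntryFacts Lay others frames u ret)
    {s : State} (hc : AtCut u₀ u ret s) (w_rip : s.rip = Vorbis.L.lookup1_values.cut4) :
    ReachVia Lay μ WayInv s (Returned (conv u₀) (Vorbis.Spec.lookup1_values.spec others frames) u ret) := by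
  have henv' := henv
  obtain ⟨hLay, he_ret_lt, he_align, he_room, he_top, he_stack, hsh⟩ := henv'
  obtain ⟨w_rsp, w_kept, w_eq, w_df, w_mx, w_sse, hsame, hun, hs0, hs1, hs2⟩ := hc
  u_walk hcode [hμ.vendor] span [Vorbis.L.textLo, Vorbis.L.textHi] side (v_side)
  case call_inv => v_inv
  case pre_10baec =>
    -- the callee's shadow clause: the stores so far went to our frame, its frame is below ours
    show ShadowPre others frames s_10baec
    refine hsh.callee ?_ ?_ ?_ ?_
    · v_untouched
    · rw [w_rsp]
      u_omega
    · rw [w_rsp]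
      u_omega
    · rw [w_rsp]
      u_omega
  · -- 0x10baf1 (cut5): after `floor`
    v_after_call w_rsp_10baec w_mem_10baec
    refine from_cut5 hμ hcode hfloor hpow henv ⟨w_rsp, w_kept, w_eq, w_df, w_mx, w_sse, ?_, ?_, ?_, ?_, ?_⟩ w_rip
    · -- only the frame was written: our stores, and the callee's frame below ours
      u_same
    · v_untouched
    · u_frame hs0
    · u_frame hs1
    · u_frame hs2

/-- From 0x10ba99 (cut3, after the first `floor`; C line 1270, FIX 18 `if (!(t >= 0 && t <= entries)) return -1; r = (int) t`):
`comisd` against 0 (`jb` to the stub 0x10bb5a), `entries` as a double spilled to [rsp], `comisd` against it (`jb` to the stub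
0x10bb61), the one `cvttsd2si` (0x10babe: ebx = any int), `dim` as a double kept in rbp, the first `pow((float) r+1, dim)`
(0x10bae7; the 1.0f is a RIP-relative constant), then cut4. -/
theorem from_cut3 {Lay : Layout} {μ : Microarch} (hμ : UserX.MicroOK μ) {u₀ : State}
    (hcode : HasCodeNat Lay u₀ Vorbis.L.lookup1_values.entry Vorbis.Code.code_lookup1_values.nat
      Vorbis.L.lookup1_values.size)
    {others : List Obj} {frames : List (Nat × FrameLayout)}
    (hfloor : Calls Lay μ Vorbis.WayInv (Vorbis.conv u₀) Vorbis.L.floor.entry (Vorbis.Spec.floor.spec others frames))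
    (hpow : Calls Lay μ Vorbis.WayInv (Vorbis.conv u₀) Vorbis.L.pow.entry (Vorbis.Spec.pow.spec others frames))
    {u : State} {ret : Word} (henv : EntryFacts Lay others frames u ret)
    {s : State} (hc : AtCut u₀ u ret s) (w_rip : s.rip = Vorbis.L.lookup1_values.cut3) :
    ReachVia Lay μ WayInv s (Returned (conv u₀) (Vorbis.Spec.lookup1_values.spec others frames) u ret) := by
  have henv' := henv
  obtain ⟨hLay, he_ret_lt, he_align, he_room, he_top, he_stack, hsh⟩ := henv'
  obtain ⟨w_rsp, w_kept, w_eq, w_df, w_mx, w_sse, hsame, hun, hs0, hs1, hs2⟩ := hc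
  u_walk hcode [hμ.vendor] span [Vorbis.L.textLo, Vorbis.L.textHi] side (v_side)
  case call_inv => v_inv
  case pre_10bae7 =>
    -- the callee's shadow clause: the stores so far went to our frame, its frame is below ours
    show ShadowPre others frames s_10bae7
    refine hsh.callee ?_ ?_ ?_ ?_
    · v_untouched
    · rw [w_rsp]
      u_omega
    · rw [w_rsp]
      u_omega
    · rw [w_rsp]
      u_omega
  · -- 0x10bb5a: `t < 0` or NaN: `return -1` (line 1270), the epilogue
    refine ReachVia.done ?_
    v_returned
    show ShadowUntouched u.mem s_10bb59.mem
    v_untouched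
  · -- 0x10bb61: `entries < t`: `return -1` (line 1270), the epilogue
    refine ReachVia.done ?_
    v_returned
    show ShadowUntouched u.mem s_10bb59.mem
    v_untouched
  · -- 0x10baec (cut4): after `pow`
    v_after_call w_rsp_10bae7 w_mem_10bae7
    refine from_cut4 hμ hcode hfloor hpow henv ⟨w_rsp, w_kept, w_eq, w_df, w_mx, w_sse, ?_, ?_, ?_, ?_, ?_⟩ w_rip
    · -- only the frame was written: our stores, and the callee's frame below ours
      u_same
    · v_untouched
    · u_frame hs0
    · u_frame hs1
    · u_frame hs2

/-- From 0x10ba94 (cut2, after `exp`; C line 1270): `call floor`, then cut3. -/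
theorem from_cut2 {Lay : Layout} {μ : Microarch} (hμ : UserX.MicroOK μ) {u₀ : State}
    (hcode : HasCodeNat Lay u₀ Vorbis.L.lookup1_values.entry Vorbis.Code.code_lookup1_values.nat
      Vorbis.L.lookup1_values.size)
    {others : List Obj} {frames : List (Nat × FrameLayout)}
    (hfloor : Calls Lay μ Vorbis.WayInv (Vorbis.conv u₀) Vorbis.L.floor.entry (Vorbis.Spec.floor.spec others frames))
    (hpow : Calls Lay μ Vorbis.WayInv (Vorbis.conv u₀) Vorbis.L.pow.entry (Vorbis.Spec.pow.spec others frames))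
    {u : State} {ret : Word} (henv : EntryFacts Lay others frames u ret)
    {s : State} (hc : AtCut u₀ u ret s) (w_rip : s.rip = Vorbis.L.lookup1_values.cut2) :
    ReachVia Lay μ WayInv s (Returned (conv u₀) (Vorbis.Spec.lookup1_values.spec others frames) u ret) := by
  have henv' := henv
  obtain ⟨hLay, he_ret_lt, he_align, he_room, he_top, he_stack, hsh⟩ := henv'
  obtain ⟨w_rsp, w_kept, w_eq, w_df, w_mx, w_sse, hsame, hun, hs0, hs1, hs2⟩ := hc
  u_walk hcode [hμ.vendor] span [Vorbis.L.textLo, Vorbis.L.textHi] side (v_side)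
  case call_inv => v_inv
  case pre_10ba94 =>
    -- the callee's shadow clause: the stores so far went to our frame, its frame is below ours
    show ShadowPre others frames s_10ba94
    refine hsh.callee ?_ ?_ ?_ ?_
    · v_untouched
    · rw [w_rsp]
      u_omega
    · rw [w_rsp]
      u_omega
    · rw [w_rsp]
      u_omega
  · -- 0x10ba99 (cut3): after `floor`
    v_after_call w_rsp_10ba94 w_mem_10ba94
    refine from_cut3 hμ hcode hfloor hpow henv ⟨w_rsp, w_kept, w_eq, w_df, w_mx, w_sse, ?_, ?_, ?_, ?_, ?_⟩ w_rip
    · -- only the frame was written: our stores, and the callee's frame below ours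
      u_same
    · v_untouched
    · u_frame hs0
    · u_frame hs1
    · u_frame hs2

/-- From 0x10ba7b (cut1, after `log`; C line 1270 `exp((float) log((float) entries) / dim)`): the float division `divss` (no
fault: the exceptions are masked), `call exp` (0x10ba8f), then cut2. -/
theorem from_cut1 {Lay : Layout} {μ : Microarch} (hμ : UserX.MicroOK μ) {u₀ : State}
    (hcode : HasCodeNat Lay u₀ Vorbis.L.lookup1_values.entry Vorbis.Code.code_lookup1_values.nat
      Vorbis.L.lookup1_values.size)
    {others : List Obj} {frames : List (Nat × FrameLayout)}
    (hexp : Calls Lay μ Vorbis.WayInv (Vorbis.conv u₀) Vorbis.L.exp.entry (Vorbis.Spec.exp.spec others frames))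
    (hfloor : Calls Lay μ Vorbis.WayInv (Vorbis.conv u₀) Vorbis.L.floor.entry (Vorbis.Spec.floor.spec others frames))
    (hpow : Calls Lay μ Vorbis.WayInv (Vorbis.conv u₀) Vorbis.L.pow.entry (Vorbis.Spec.pow.spec others frames))
    {u : State} {ret : Word} (henv : EntryFacts Lay others frames u ret)
    {s : State} (hc : AtCut u₀ u ret s) (w_rip : s.rip = Vorbis.L.lookup1_values.cut1) :
    ReachVia Lay μ WayInv s (Returned (conv u₀) (Vorbis.Spec.lookup1_values.spec others frames) u ret) := by
  have henv' := henv
  obtain ⟨hLay, he_ret_lt, he_align, he_room, he_top, he_stack, hsh⟩ := henv'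
  obtain ⟨w_rsp, w_kept, w_eq, w_df, w_mx, w_sse, hsame, hun, hs0, hs1, hs2⟩ := hc
  u_walk hcode [hμ.vendor] span [Vorbis.L.textLo, Vorbis.L.textHi] side (v_side)
  case call_inv => v_inv
  case pre_10ba8f =>
    -- the callee's shadow clause: the stores so far went to our frame, its frame is below ours
    show ShadowPre others frames s_10ba8f
    refine hsh.callee ?_ ?_ ?_ ?_
    · v_untouched
    · rw [w_rsp]
      u_omega
    · rw [w_rsp]
      u_omega
    · rw [w_rsp]
      u_omega
  · -- 0x10ba94 (cut2): after `exp`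
    v_after_call w_rsp_10ba8f w_mem_10ba8f
    refine from_cut2 hμ hcode hfloor hpow henv ⟨w_rsp, w_kept, w_eq, w_df, w_mx, w_sse, ?_, ?_, ?_, ?_, ?_⟩ w_rip
    · -- only the frame was written: our stores, and the callee's frame below ours
      u_same
    · v_untouched
    · u_frame hs0
    · u_frame hs1
    · u_frame hs2

end Vorbis.Spec.lookup1_values

/-- `lookup1_values` satisfies its contract. The prologue (0x10ba60, C line 1269: `push rbp ; push rbx ; sub rsp, 18H`) and
`log((float) entries)` (0x10ba76) are walked here; at the instruction after the call (cut1) the invariant of the cut points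
`AtCut` holds, and the lemmas `from_cut1` … `from_cut8` (one per call) walk the rest to the `ret`. -/
theorem Vorbis.Spec.Worked.lookup1_values_ok : Vorbis.Spec.lookup1_values.Statement := by
  intro Lay hLay μ hμ u₀ hcode h_log h_exp h_floor h_pow others frames u ret he hpre
  v_entry he
  have hlog := h_log others frames
  have hexp := h_exp others frames
  have hfloor := h_floor others frames
  have hpow := h_pow others frames
  have hsh : ShadowPre others frames u := hpre
  have henv : Vorbis.Spec.lookup1_values.EntryFacts Lay others frames u ret :=
    ⟨hLay, he_ret_lt, he_align, he_room, he_top, he_stack, hsh⟩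
  u_walk hcode [hμ.vendor] span [Vorbis.L.textLo, Vorbis.L.textHi] side (v_side)
  case call_inv => v_inv
  case pre_10ba76 =>
    -- the callee's shadow clause: the stores so far went to our frame, its frame is below ours
    show ShadowPre others frames s_10ba76
    refine hsh.callee ?_ ?_ ?_ ?_
    · v_untouched
    · rw [w_rsp]
      u_omega
    · rw [w_rsp]
      u_omega
    · rw [w_rsp]
      u_omega
  -- 0x10ba7b (cut1): after `log`
  v_after_call w_rsp_10ba76 w_mem_10ba76
  refine Vorbis.Spec.lookup1_values.from_cut1 hμ hcode hexp hfloor hpow henv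
    ⟨w_rsp, w_kept, w_eq, w_df, w_mx, w_sse, ?_, ?_, ?_, ?_, ?_⟩ w_rip
  · -- only the frame was written: the two pushes, the return address of the call, and the callee's frame below ours
    u_same
  · v_untouched
  · u_frame he_retAddr
  · -- the saved rbp: the first push, read through the later stores and the callee's footprint
    have hp : UInt64.ofNat (s_10ba76.mem.readLE (u.reg .rsp - 8) 8) = u.reg .rbp := by
      u_resolve
    rw [w_mem_10ba76] at hp
    u_frame hp
  · -- the saved rbx: the second push
    have hp : UInt64.ofNat (s_10ba76.mem.readLE (u.reg .rsp - 16) 8) = u.reg .rbx := by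
      u_resolve
    rw [w_mem_10ba76] at hp
    u_frame hp
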